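-- pv_equiv track=rewrite | github.com/harvestwalukow/web-hr-cesgs | apps/hrd/utils/jatah_cuti.py | distributeDaysByMonth
-- ===== SOURCE A (Python) =====
-- def distributeDaysByMonth(startMonth, startYear, days):
--     """
--     Helper function untuk mendistribusikan hari cuti secara berurutan per bulan.
--
--     Args:
--         startMonth (int): Bulan mulai (1-12)
--         startYear (int): Tahun mulai
--         days (int): Jumlah hari yang akan didistribusikan
--
--     Returns:
--         list: Daftar tuple (year, month, increment) sepanjang days
--     """
--     distribution = []
--     current_month = startMonth
--     current_year = startYear
--
--     for _ in range(days):
--         distribution.append((current_year, current_month, 1))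
--
--         # Pindah ke bulan berikutnya
--         current_month += 1
--         if current_month > 12:
--             current_month = 1
--             current_year += 1
--
--     return distribution
-- ===== SOURCE B (Python) =====
-- def distributeDaysByMonth(startMonth, startYear, days):
--     return [
--         (startYear + (startMonth - 1 + i) // 12, (startMonth - 1 + i) % 12 + 1, 1)
--         for i in range(days)
--     ]
-- ===== Notes on version B (the rewrite author's own statement) =====
-- stated objective: simpler
-- what changed: Replaces the stateful month/year carry loop with a single list comprehension computing each entry in closed form via divmod on startMonth-1+i.
-- outside the precondition, e.g. on distributeDaysByMonth(13, 2020, 2): A returns [(2020, 13, 1), (2021, 1, 1)], B returns [(2021, 1, 1), (2021, 2, 1)]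
import Mathlib
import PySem

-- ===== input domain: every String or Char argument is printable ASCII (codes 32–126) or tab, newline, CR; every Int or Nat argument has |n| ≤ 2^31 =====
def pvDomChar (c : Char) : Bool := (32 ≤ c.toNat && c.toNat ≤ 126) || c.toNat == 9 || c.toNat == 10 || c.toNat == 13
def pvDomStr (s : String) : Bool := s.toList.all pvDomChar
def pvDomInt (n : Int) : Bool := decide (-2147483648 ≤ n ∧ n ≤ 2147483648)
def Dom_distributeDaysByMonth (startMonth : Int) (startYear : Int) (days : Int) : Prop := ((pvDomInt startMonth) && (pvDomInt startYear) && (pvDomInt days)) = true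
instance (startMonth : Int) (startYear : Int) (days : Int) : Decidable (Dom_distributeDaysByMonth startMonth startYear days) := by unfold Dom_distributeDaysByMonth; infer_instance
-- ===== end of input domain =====

-- B replaces A's stateful month/year carry loop by a closed-form divmod per index (simpler);
-- Pre_ restricts to the documented natural domain 1 <= startMonth <= 12 (the docstring's "Bulan mulai (1-12)").


-- ===== PORT A =====
-- literal transliteration: foldl over range(days), state = (distribution, current_month, current_year)
def pvStepA (s : List (Int × Int × Int) × Int × Int) (_ : Int) : List (Int × Int × Int) × Int × Int :=
  let dist := s.1 ++ [(s.2.2, s.2.1, 1)]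
  let cm := s.2.1 + 1
  if cm > 12 then (dist, 1, s.2.2 + 1) else (dist, cm, s.2.2)

def distributeDaysByMonth (startMonth : Int) (startYear : Int) (days : Int) : List (Int × Int × Int) :=
  ((PySem.List.pyRange 0 days 1).foldl pvStepA ([], startMonth, startYear)).1

-- ===== PORT B =====
-- literal transliteration of Source B: a comprehension over range(days) with Python's // and %
def distributeDaysByMonth_alt (startMonth : Int) (startYear : Int) (days : Int) : List (Int × Int × Int) :=
  (PySem.List.pyRange 0 days 1).map (fun i =>
    (startYear + PySem.Int.floordiv (startMonth - 1 + i) 12,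
     PySem.Int.mod (startMonth - 1 + i) 12 + 1, 1))

-- ===== PRECONDITION & SPEC =====
-- Pre_ excludes only the case of an out-of-range startMonth with at least one day to distribute
-- (outside the docstring's natural domain "Bulan mulai (1-12)"), where A emits the unnormalized
-- month (e.g. month 13) before wrapping; for days <= 0 both return [] for any startMonth.
def Pre_distributeDaysByMonth (startMonth : Int) (startYear : Int) (days : Int) : Prop :=
  days ≤ 0 ∨ (1 ≤ startMonth ∧ startMonth ≤ 12)
instance (startMonth : Int) (startYear : Int) (days : Int) : Decidable (Pre_distributeDaysByMonth startMonth startYear days) := by unfold Pre_distributeDaysByMonth; infer_instance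

def pvWitness_distributeDaysByMonth : Int × Int × Int := (11, 2024, 5)

def Spec_distributeDaysByMonth (startMonth : Int) (startYear : Int) (days : Int) (out : List (Int × Int × Int)) : Prop := out = distributeDaysByMonth_alt startMonth startYear days
instance (startMonth : Int) (startYear : Int) (days : Int) (out : List (Int × Int × Int)) : Decidable (Spec_distributeDaysByMonth startMonth startYear days out) := by unfold Spec_distributeDaysByMonth; infer_instance

-- ===== CLAIM (what is proved, stated in full; the proofs are below) =====
def Claim_equal_distributeDaysByMonth : Prop := ∀ (startMonth : Int) (startYear : Int) (days : Int), Dom_distributeDaysByMonth startMonth startYear days → Pre_distributeDaysByMonth startMonth startYear days → Spec_distributeDaysByMonth startMonth startYear days (distributeDaysByMonth startMonth startYear days)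

-- ===== LEMMAS AND PROOFS =====

-- A's loop, as a structural recursion on the number of remaining iterations
def pvGo (m y : Int) : Nat → List (Int × Int × Int)
  | 0 => []
  | n+1 => (y, m, 1) :: (if m + 1 > 12 then pvGo 1 (y + 1) n else pvGo (m + 1) y n)

theorem pvFoldl_eq_go (l : List Int) (acc : List (Int × Int × Int)) (m y : Int) :
    (l.foldl pvStepA (acc, m, y)).1 = acc ++ pvGo m y l.length := by
  induction l generalizing acc m y with
  | nil => simp [pvGo]
  | cons a t ih =>
    simp only [List.foldl_cons, List.length_cons]
    by_cases h : m + 1 > 12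
    · rw [show pvStepA (acc, m, y) a = (acc ++ [(y, m, 1)], 1, y + 1) from by
        simp [pvStepA, h]]
      rw [ih]
      simp [pvGo, h]
    · rw [show pvStepA (acc, m, y) a = (acc ++ [(y, m, 1)], m + 1, y) from by
        simp [pvStepA, h]]
      rw [ih]
      simp [pvGo, h]

theorem pvGo_closed (n : Nat) : ∀ (m y : Int), 1 ≤ m → m ≤ 12 →
    pvGo m y n = (List.range n).map (fun (k : Nat) =>
      (y + PySem.Int.floordiv (m - 1 + (k : Int)) 12,
       PySem.Int.mod (m - 1 + (k : Int)) 12 + 1, 1)) := by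
  induction n with
  | zero => intro m y _ _; simp [pvGo]
  | succ n ih =>
    intro m y h1 h2
    rw [List.range_succ_eq_map]
    simp only [pvGo, List.map_cons, List.map_map]
    rw [List.cons_eq_cons]
    have hdv : ∀ a : Int, PySem.Int.floordiv a 12 = a / 12 :=
      fun a => PySem.Int.floordiv_eq_ediv_of_pos (by norm_num)
    have hmd : ∀ a : Int, PySem.Int.mod a 12 = a % 12 :=
      fun a => PySem.Int.mod_eq_emod_of_pos (by norm_num)
    constructor
    · -- head entry: for 1 ≤ m ≤ 12, (m-1) // 12 = 0 and (m-1) % 12 = m-1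
      simp only [hdv, hmd, Prod.mk.injEq]
      push_cast
      refine ⟨by omega, by omega, trivial⟩
    · by_cases h : m + 1 > 12
      · -- m = 12: wrap to month 1, year + 1
        simp only [if_pos h]
        rw [ih 1 (y + 1) (by omega) (by omega)]
        apply List.map_congr_left
        intro k _
        simp only [Function.comp, hdv, hmd, Prod.mk.injEq]
        push_cast
        refine ⟨by omega, by omega, trivial⟩
      · -- m < 12: just advance the month
        simp only [if_neg h]
        rw [ih (m + 1) y (by omega) (by omega)]
        apply List.map_congr_left
        intro k _
        simp only [Function.comp, hdv, hmd, Prod.mk.injEq]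
        push_cast
        refine ⟨by omega, by omega, trivial⟩

-- ===== VERDICT (by name: the statement is the Claim_ definition above) =====
theorem distributeDaysByMonth_spec : Claim_equal_distributeDaysByMonth := by
  intro m y d _ hpre
  unfold Spec_distributeDaysByMonth distributeDaysByMonth distributeDaysByMonth_alt
  rcases hpre with hd | ⟨h1, h2⟩
  · rw [PySem.List.pyRange_one_eq_nil (by omega)]
    simp
  · rw [pvFoldl_eq_go, PySem.List.length_pyRange_one,
      pvGo_closed _ _ _ h1 h2, PySem.List.pyRange_one]
    simp [List.map_map, Function.comp]
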